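-- pv_equiv track=rewrite | github.com/RodrigoMaroto/AdventOfCode | solutions/2024/day_07/solution.py | valid_equation
-- ===== SOURCE A (Python) =====
-- def valid_equation(result: int, operands: list[int], check_concat: bool = True) -> bool:
--     if len(operands) == 1:
--         return operands[0] == result
--
--     last = operands[-1]
--
--     if result % last == 0:
--         possible_mul = valid_equation(result // last, operands[:-1], check_concat)
--     else:
--         possible_mul = False
--
--     possible_add = valid_equation(result - last, operands[:-1], check_concat)
--
--     possible_concat = False
--     if check_concat:
--         shift = 10 ** len(str(last))
--         if (result - last) % shift == 0:
--             possible_concat = valid_equation((result - last) // shift, operands[:-1])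
--
--     return possible_mul or possible_add or possible_concat
-- ===== SOURCE B (Python) =====
-- def valid_equation(result: int, operands: list[int], check_concat: bool = True) -> bool:
--     # Forward left-to-right enumeration with an accumulator (no division/pruning).
--     def go(acc, rest):
--         if not rest:
--             return acc == result
--         nxt = rest[0]
--         if go(acc + nxt, rest[1:]):
--             return True
--         if go(acc * nxt, rest[1:]):
--             return True
--         if check_concat:
--             shift = 10 ** len(str(nxt))
--             if go(acc * shift + nxt, rest[1:]):
--                 return True
--         return False
--     return go(operands[0], operands[1:])
-- ===== Notes on version B (the rewrite author's own statement) =====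
-- stated objective: alternative
-- what changed: B replaces A's backward right-to-left search (peeling the last operand with divisibility/modulo pruning) by a forward left-to-right enumeration carrying an accumulator, trying +, * and digit-concatenation at each step with no division at all.
import Mathlib
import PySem

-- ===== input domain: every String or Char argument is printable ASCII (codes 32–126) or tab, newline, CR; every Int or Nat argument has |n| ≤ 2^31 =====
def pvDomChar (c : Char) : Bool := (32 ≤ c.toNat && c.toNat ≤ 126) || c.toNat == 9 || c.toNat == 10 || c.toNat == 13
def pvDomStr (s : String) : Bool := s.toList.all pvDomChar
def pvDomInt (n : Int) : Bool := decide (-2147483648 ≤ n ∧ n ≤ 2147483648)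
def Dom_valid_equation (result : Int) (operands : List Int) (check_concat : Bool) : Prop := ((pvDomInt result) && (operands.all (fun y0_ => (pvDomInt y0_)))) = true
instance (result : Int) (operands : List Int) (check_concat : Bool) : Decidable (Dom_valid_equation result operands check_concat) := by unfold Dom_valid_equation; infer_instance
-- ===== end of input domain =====

-- ===== PORT A =====
-- B replaces A's backward divisibility-pruned search by a forward accumulator enumeration (alternative algorithm, no division).
-- Port of A: recursion peeling the last operand (operands[:-1]); `false` arms mark inputs
-- where Python raises (IndexError on operands[-1], ZeroDivisionError on % 0) — excluded by Pre_.
def valid_equation (result : Int) (operands : List Int) (check_concat : Bool) : Bool :=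
  if operands.length = 1 then
    PySem.List.pyGetD operands 0 0 == result
  else
    match hL : PySem.List.pyGet? operands (-1) with
    | none => false  -- IndexError (empty list): outside Pre_
    | some last =>
      match PySem.Int.mod? result last, PySem.Int.floordiv? result last with
      | some m, some q =>
        let init := PySem.List.slice operands none (some (-1))
        let possible_mul := if m = 0 then valid_equation q init check_concat else false
        let possible_add := valid_equation (result - last) init check_concat
        let possible_concat :=
          if check_concat then
            -- shift = 10 ** len(str(last)); shift > 0, so total mod/floordiv are Python-exact here
            let shift : Int := 10 ^ (PySem.Int.toChars last).length
            if PySem.Int.mod (result - last) shift = 0 then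
              valid_equation (PySem.Int.floordiv (result - last) shift) init true
            else false
          else false
        possible_mul || possible_add || possible_concat
      | _, _ => false  -- ZeroDivisionError (last == 0): outside Pre_
  termination_by operands.length
  decreasing_by
  all_goals
    rw [PySem.List.slice_to_neg_one]
    cases operands with
    | nil => simp [PySem.List.pyGet?] at hL
    | cons a t => simp

-- ===== PORT B =====
-- helper: B's inner `go(acc, rest)` — forward enumeration over the remaining operands
def goB (result : Int) (check_concat : Bool) (acc : Int) : List Int → Bool
  | [] => acc == result
  | nxt :: rest =>
    if goB result check_concat (acc + nxt) rest then true
    else if goB result check_concat (acc * nxt) rest then true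
    else if check_concat then
      let shift : Int := 10 ^ (PySem.Int.toChars nxt).length
      goB result check_concat (acc * shift + nxt) rest
    else false

def valid_equation_alt (result : Int) (operands : List Int) (check_concat : Bool) : Bool :=
  match PySem.List.pyGet? operands 0 with
  | none => false  -- IndexError on operands[0] (empty list): outside Pre_
  | some first => goB result check_concat first operands.tail

-- ===== PRECONDITION & SPEC =====
-- Pre_ excludes exactly the inputs where the Python A raises: the empty list (IndexError)
-- and lists with a 0 after the first position (ZeroDivisionError in `result % last`).
def Pre_valid_equation (result : Int) (operands : List Int) (check_concat : Bool) : Prop :=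
  operands ≠ [] ∧ ∀ x ∈ operands.tail, x ≠ 0
instance (result : Int) (operands : List Int) (check_concat : Bool) : Decidable (Pre_valid_equation result operands check_concat) := by unfold Pre_valid_equation; infer_instance

def pvWitness_valid_equation : Int × List Int × Bool := (190, [19, 10], true)


def Spec_valid_equation (result : Int) (operands : List Int) (check_concat : Bool) (out : Bool) : Prop := out = valid_equation_alt result operands check_concat
instance (result : Int) (operands : List Int) (check_concat : Bool) (out : Bool) : Decidable (Spec_valid_equation result operands check_concat out) := by unfold Spec_valid_equation; infer_instance

-- ===== CLAIM (what is proved, stated in full; the proofs are below) =====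
def Claim_equal_valid_equation : Prop := ∀ (result : Int) (operands : List Int) (check_concat : Bool), Dom_valid_equation result operands check_concat → Pre_valid_equation result operands check_concat → Spec_valid_equation result operands check_concat (valid_equation result operands check_concat)


-- ===== LEMMAS AND PROOFS =====
-- goB's if-chain on a cons is the disjunction of its three branch recursions
theorem bool_chain3 (a b c cc : Bool) :
    (if a then true else if b then true else if cc then c else false) = (b || a || (cc && c)) := by
  cases a <;> cases b <;> cases cc <;> cases c <;> simp

theorem goB_cons (R : Int) (cc : Bool) (acc nxt : Int) (rest : List Int) :
    goB R cc acc (nxt :: rest) =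
      (goB R cc (acc * nxt) rest || goB R cc (acc + nxt) rest ||
       (cc && goB R cc (acc * 10 ^ (PySem.Int.toChars nxt).length + nxt) rest)) := by
  simp only [goB]
  rw [bool_chain3]

-- pure Bool rearrangement: distributing the three first-operand branches over the last-operand split
theorem bool_distrib9 (c1 c2 : Prop) [Decidable c1] [Decidable c2]
    (cc m1 m2 m3 a1 a2 a3 k1 k2 k3 : Bool) :
    (((if c1 then m1 else false) || a1 || (cc && (if c2 then k1 else false))) ||
     ((if c1 then m2 else false) || a2 || (cc && (if c2 then k2 else false))) ||
     (cc && ((if c1 then m3 else false) || a3 || (cc && (if c2 then k3 else false))))) =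
    ((if c1 then (m1 || m2 || (cc && m3)) else false) || (a1 || a2 || (cc && a3)) ||
     (cc && (if c2 then (k1 || k2 || (cc && k3)) else false))) := by
  split_ifs <;> cases cc <;> simp [Bool.or_comm, Bool.or_left_comm]

-- exactness of A's divisibility pruning: for d ≠ 0, acc * d = R iff d ∣ R and acc = R // d
theorem mul_prune (R d acc : Int) (hd0 : d ≠ 0) :
    (acc * d == R) = (if PySem.Int.mod R d = 0 then acc == PySem.Int.floordiv R d else false) := by
  by_cases hd : PySem.Int.mod R d = 0
  · have hdvd : PySem.Int.floordiv R d * d = R := by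
      have := PySem.Int.floordiv_mul_add_mod R d; omega
    simp only [hd, if_pos]
    by_cases h : acc = PySem.Int.floordiv R d
    · simp [h, hdvd]
    · have : acc * d ≠ R := fun hE => h (mul_right_cancel₀ hd0 (by rw [hdvd]; exact hE))
      simp [h, this]
  · have : acc * d ≠ R := fun hE =>
      hd ((PySem.Int.mod_eq_zero_iff_dvd R d).2 ⟨acc, by rw [← hE]; ring⟩)
    simp [hd, this]

-- key lemma: appending a last operand to goB's worklist matches A's backward case split
theorem goB_append_last (R l : Int) (cc : Bool) (hl : l ≠ 0) :
    ∀ (rest : List Int) (acc : Int),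
    goB R cc acc (rest ++ [l]) =
      ((if PySem.Int.mod R l = 0 then goB (PySem.Int.floordiv R l) cc acc rest else false) ||
       goB (R - l) cc acc rest ||
       (cc && (if PySem.Int.mod (R - l) (10 ^ (PySem.Int.toChars l).length) = 0 then
                 goB (PySem.Int.floordiv (R - l) (10 ^ (PySem.Int.toChars l).length)) cc acc rest
               else false))) := by
  intro rest
  induction rest with
  | nil =>
    intro acc
    have hadd : (acc + l == R) = (acc == R - l) := by
      by_cases h : acc = R - l <;> simp [h] <;> omega
    have hs : (10:Int) ^ (PySem.Int.toChars l).length ≠ 0 := by positivity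
    have hcc : (acc * 10 ^ (PySem.Int.toChars l).length + l == R) =
        (if PySem.Int.mod (R - l) (10 ^ (PySem.Int.toChars l).length) = 0 then
           acc == PySem.Int.floordiv (R - l) (10 ^ (PySem.Int.toChars l).length) else false) := by
      rw [← mul_prune (R - l) _ acc hs]
      by_cases h : acc * 10 ^ (PySem.Int.toChars l).length = R - l <;> simp [h] <;> omega
    rw [List.nil_append, goB_cons]
    simp only [goB]
    rw [mul_prune R l acc hl, hadd, hcc]
  | cons x rest ih =>
    intro acc
    rw [List.cons_append, goB_cons, ih, ih, ih, goB_cons, goB_cons, goB_cons]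
    exact bool_distrib9 _ _ cc _ _ _ _ _ _ _ _ _

-- valid_equation_alt on a cons unfolds to goB on the tail
theorem alt_cons (R : Int) (cc : Bool) (a : Int) (t : List Int) :
    valid_equation_alt R (a :: t) cc = goB R cc a t := by
  simp [valid_equation_alt, PySem.List.pyGet?, PySem.List.pyIdx?]

theorem main_equiv : ∀ (operands : List Int), operands ≠ [] → (∀ x ∈ operands.tail, x ≠ 0) →
    ∀ (R : Int) (cc : Bool), valid_equation R operands cc = valid_equation_alt R operands cc := by
  intro operands
  induction operands using List.reverseRecOn with
  | nil => intro h; exact absurd rfl h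
  | append_singleton init l ih =>
    intro _ htail R cc
    cases init with
    | nil =>
      simp [valid_equation, valid_equation_alt, PySem.List.pyGet?, PySem.List.pyIdx?, goB]
    | cons a t =>
      have hlen : ((a :: t) ++ [l]).length ≠ 1 := by simp
      have hl : l ≠ 0 := htail l (by simp)
      have htail' : ∀ x ∈ (a :: t).tail, x ≠ 0 := by
        intro x hx
        exact htail x (by simp at hx ⊢; tauto)
      have ihx := ih (by simp) htail'
      rw [valid_equation, if_neg hlen, PySem.List.pyGet?_neg_one_append_singleton]
      simp only [PySem.Int.mod?, PySem.Int.floordiv?, if_neg hl]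
      simp only [PySem.List.slice_to_neg_one, List.dropLast_concat]
      have hmod : ∀ a b : Int, Int.fmod a b = PySem.Int.mod a b := fun _ _ => rfl
      have hdiv : ∀ a b : Int, Int.fdiv a b = PySem.Int.floordiv a b := fun _ _ => rfl
      rw [List.cons_append, alt_cons, goB_append_last R l cc hl t a]
      rw [ihx, ihx, ihx, alt_cons, alt_cons, alt_cons, hmod, hdiv]
      cases cc <;> simp

-- ===== VERDICT (by name: the statement is the Claim_ definition above) =====
theorem valid_equation_spec : Claim_equal_valid_equation := by
  intro R ops cc _ hpre
  unfold Spec_valid_equation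
  exact main_equiv ops hpre.1 hpre.2 R cc
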